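-- pv_equiv track=rewrite | github.com/Chandrakanthcc/Python- | largest.py | largest_even_odd
-- ===== SOURCE A (Python) =====
-- def largest_even_odd(numbers):
--     largest_even = None
--     largest_odd = None
--
--     for num in numbers:
--         if num % 2 == 0:
--             if largest_even is None or num > largest_even:
--                 largest_even = num
--         else:
--             if largest_odd is None or num > largest_odd:
--                 largest_odd = num
--
--     return largest_even, largest_odd
-- ===== SOURCE B (Python) =====
-- def largest_even_odd(numbers):
--     evens = [n for n in numbers if n % 2 == 0]
--     odds = [n for n in numbers if n % 2 != 0]
--     return (max(evens, default=None), max(odds, default=None))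
-- ===== Notes on version B (the rewrite author's own statement) =====
-- stated objective: idiomatic
-- what changed: Replaces the single interleaved loop with manual None-or-greater tracking by two parity-filter comprehensions followed by library max(..., default=None) reductions.
import Mathlib
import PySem

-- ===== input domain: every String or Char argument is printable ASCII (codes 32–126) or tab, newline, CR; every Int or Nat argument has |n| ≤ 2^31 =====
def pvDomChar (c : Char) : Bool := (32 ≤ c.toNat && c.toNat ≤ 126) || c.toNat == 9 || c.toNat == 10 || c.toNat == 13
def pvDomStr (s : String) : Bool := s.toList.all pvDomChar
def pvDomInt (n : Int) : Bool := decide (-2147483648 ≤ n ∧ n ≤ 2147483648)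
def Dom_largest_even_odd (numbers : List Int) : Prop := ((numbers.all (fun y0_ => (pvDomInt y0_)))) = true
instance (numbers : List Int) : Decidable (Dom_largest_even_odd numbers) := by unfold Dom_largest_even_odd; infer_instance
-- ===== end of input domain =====

-- B replaces A's single interleaved loop with manual None-tracking by two parity
-- filters plus max(..., default=None) reductions (idiomatic; same O(n) cost).

-- ===== PORT A =====
-- one loop step of A: classify num by parity, update the matching running maximum
def pvStepA (st : Option Int × Option Int) (num : Int) : Option Int × Option Int :=
  if PySem.Int.mod num 2 == 0 then
    match st.1 with
    | none => (some num, st.2)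
    | some e => if num > e then (some num, st.2) else st
  else
    match st.2 with
    | none => (st.1, some num)
    | some o => if num > o then (st.1, some num) else st

def largest_even_odd (numbers : List Int) : Option Int × Option Int :=
  numbers.foldl pvStepA (none, none)

-- ===== PORT B =====
def largest_even_odd_alt (numbers : List Int) : Option Int × Option Int :=
  let evens := numbers.filter (fun n => PySem.Int.mod n 2 == 0)
  let odds := numbers.filter (fun n => !(PySem.Int.mod n 2 == 0))
  (PySem.List.max? evens (fun x => x), PySem.List.max? odds (fun x => x))

-- ===== PRECONDITION & SPEC =====
def Spec_largest_even_odd (numbers : List Int) (out : Option Int × Option Int) : Prop := out = largest_even_odd_alt numbers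
instance (numbers : List Int) (out : Option Int × Option Int) : Decidable (Spec_largest_even_odd numbers out) := by unfold Spec_largest_even_odd; infer_instance

-- ===== CLAIM (what is proved, stated in full; the proofs are below) =====
def Claim_equal_largest_even_odd : Prop := ∀ (numbers : List Int), Dom_largest_even_odd numbers → Spec_largest_even_odd numbers (largest_even_odd numbers)

-- ===== LEMMAS AND PROOFS =====

-- running-maximum loop over one parity class (A's per-class update)
def pvRunMax (st : Option Int) (xs : List Int) : Option Int :=
  xs.foldl (fun s n => match s with | none => some n | some m => if n > m then some n else s) st

theorem pvStepA_split (xs : List Int) : ∀ (e o : Option Int),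
    xs.foldl pvStepA (e, o) =
      (pvRunMax e (xs.filter (fun n => PySem.Int.mod n 2 == 0)),
       pvRunMax o (xs.filter (fun n => !(PySem.Int.mod n 2 == 0)))) := by
  induction xs with
  | nil => intro e o; rfl
  | cons x t ih =>
    intro e o
    by_cases h : PySem.Int.mod x 2 == 0
    · simp only [List.foldl_cons, List.filter_cons, h, pvStepA]
      cases e with
      | none => simpa [pvStepA, h, pvRunMax] using ih (some x) o
      | some m =>
        by_cases hx : x > m
        · simpa [pvStepA, h, hx, pvRunMax] using ih (some x) o
        · simpa [pvStepA, h, hx, pvRunMax] using ih (some m) o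
    · simp only [List.foldl_cons, List.filter_cons, h, pvStepA]
      cases o with
      | none => simpa [pvStepA, h, pvRunMax] using ih e (some x)
      | some m =>
        by_cases hx : x > m
        · simpa [pvStepA, h, hx, pvRunMax] using ih e (some x)
        · simpa [pvStepA, h, hx, pvRunMax] using ih e (some m)

theorem pvRunMax_some (xs : List Int) : ∀ (a : Int),
    pvRunMax (some a) xs = some (xs.foldl max a) := by
  induction xs with
  | nil => intro a; rfl
  | cons x t ih =>
    intro a
    by_cases hx : x > a
    · have : max a x = x := by omega
      simpa [pvRunMax, hx, this] using ih x
    · have : max a x = a := by omega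
      simpa [pvRunMax, hx, this] using ih a

theorem pvRunMax_none (xs : List Int) :
    pvRunMax none xs = PySem.List.max? xs (fun x => x) := by
  cases xs with
  | nil => rfl
  | cons x t =>
    have h1 : pvRunMax none (x :: t) = pvRunMax (some x) t := rfl
    rw [h1, pvRunMax_some, PySem.List.max?_id_cons]

-- ===== VERDICT (by name: the statement is the Claim_ definition above) =====
theorem largest_even_odd_spec : Claim_equal_largest_even_odd := by
  intro numbers _
  unfold Spec_largest_even_odd largest_even_odd largest_even_odd_alt
  rw [pvStepA_split, pvRunMax_none, pvRunMax_none]
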